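-- pv_equiv track=rewrite | github.com/SESAM-Polimi/RAMP-Streamlit | core/utils.py | default_month_partition
-- ===== SOURCE A (Python) =====
-- from typing import List, Tuple
--
-- def default_month_partition(k: int) -> List[List[int]]:
--     """Partition months 1..12 into k contiguous blocks (reasonable default)."""
--     months = list(range(1, 13))
--     if k == 1:
--         return [months]
--     base, extra = divmod(12, k)
--     parts, idx = [], 0
--     for i in range(k):
--         size = base + (1 if i < extra else 0)
--         parts.append(months[idx: idx + size])
--         idx += size
--     return parts
-- ===== SOURCE B (Python) =====
-- def default_month_partition(k):
--     months = list(range(1, 13))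
--     base, extra = divmod(12, k)
--     bounds = [i * base + min(i, extra) for i in range(k + 1)]
--     return [months[b0:b1] for b0, b1 in zip(bounds, bounds[1:])]
-- ===== Notes on version B (the rewrite author's own statement) =====
-- stated objective: alternative
-- what changed: B replaces A's stateful loop (running index idx, incremental size) and its k==1 special case with a closed-form boundary table bounds[i] = i*base + min(i, extra) built in one comprehension, then slices months between consecutive boundaries via zip.
import Mathlib
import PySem

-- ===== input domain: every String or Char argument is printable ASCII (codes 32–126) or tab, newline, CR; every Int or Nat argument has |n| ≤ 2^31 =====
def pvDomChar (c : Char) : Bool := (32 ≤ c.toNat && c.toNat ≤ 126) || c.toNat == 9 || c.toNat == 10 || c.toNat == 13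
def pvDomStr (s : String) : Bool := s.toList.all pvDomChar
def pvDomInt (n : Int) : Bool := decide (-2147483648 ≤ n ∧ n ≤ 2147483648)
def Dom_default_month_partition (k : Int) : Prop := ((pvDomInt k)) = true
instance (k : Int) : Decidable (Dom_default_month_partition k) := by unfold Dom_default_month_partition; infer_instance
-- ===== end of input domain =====

-- B replaces A's stateful loop with a closed-form boundary table and consecutive-pair slicing (objective: alternative decomposition).

-- ===== PORT A =====
def default_month_partition (k : Int) : List (List Int) :=
  let months := PySem.List.pyRange 1 13 1
  if k == 1 then [months]
  else
    match PySem.Int.divmod? 12 k with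
    | none => []   -- divmod(12, 0) raises ZeroDivisionError in Python; excluded by Pre_
    | some (base, extra) =>
      ((PySem.List.pyRange 0 k 1).foldl
        (fun (s : List (List Int) × Int) i =>
          let size := base + (if i < extra then 1 else 0)
          (s.1 ++ [PySem.List.slice months (some s.2) (some (s.2 + size))], s.2 + size))
        ([], 0)).1

-- ===== PORT B =====
def default_month_partition_alt (k : Int) : List (List Int) :=
  let months := PySem.List.pyRange 1 13 1
  match PySem.Int.divmod? 12 k with
  | none => []   -- divmod(12, 0) raises ZeroDivisionError in Python; excluded by Pre_
  | some (base, extra) =>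
    let bounds := (PySem.List.pyRange 0 (k + 1) 1).map (fun i => i * base + min i extra)
    (bounds.zip bounds.tail).map (fun p => PySem.List.slice months (some p.1) (some p.2))

-- ===== PRECONDITION & SPEC =====
-- Pre_ excludes exactly k = 0, where Python's divmod(12, 0) raises ZeroDivisionError in both A and B.
def Pre_default_month_partition (k : Int) : Prop := k ≠ 0
instance (k : Int) : Decidable (Pre_default_month_partition k) := by unfold Pre_default_month_partition; infer_instance
def pvWitness_default_month_partition : Int := 5

def Spec_default_month_partition (k : Int) (out : List (List Int)) : Prop := out = default_month_partition_alt k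
instance (k : Int) (out : List (List Int)) : Decidable (Spec_default_month_partition k out) := by unfold Spec_default_month_partition; infer_instance

-- ===== CLAIM (what is proved, stated in full; the proofs are below) =====
def Claim_equal_default_month_partition : Prop := ∀ (k : Int), Dom_default_month_partition k → Pre_default_month_partition k → Spec_default_month_partition k (default_month_partition k)

-- ===== LEMMAS AND PROOFS =====

-- consecutive-pair zip of a mapped range
theorem zip_tail_map_range {α : Type} (g : Nat → α) (n : Nat) :
    (((List.range (n + 1)).map g).zip (((List.range (n + 1)).map g).tail))
      = (List.range n).map (fun j => (g j, g (j + 1))) := by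
  apply List.ext_getElem
  · simp
  · intro i h1 h2
    simp_all [List.getElem_zip, List.getElem_tail]

-- A's loop invariant: after i iterations, idx = f i and parts = slices between consecutive f's
theorem foldA_eq (months : List Int) (base extra : Int) (hextra : 0 ≤ extra) (n : Nat) :
    ((List.range n).map Int.ofNat).foldl
        (fun (s : List (List Int) × Int) i =>
          (s.1 ++ [PySem.List.slice months (some s.2) (some (s.2 + (base + (if i < extra then 1 else 0))))],
           s.2 + (base + (if i < extra then 1 else 0))))
        ([], 0)
      = ((List.range n).map
          (fun (j : Nat) => PySem.List.slice months (some ((j : Int) * base + min (j : Int) extra))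
                      (some (((j : Int) + 1) * base + min ((j : Int) + 1) extra))),
         (n : Int) * base + min (n : Int) extra) := by
  induction n with
  | zero => simp [min_eq_left hextra]
  | succ m ih =>
    rw [List.range_succ, List.map_append, List.map_append, List.foldl_append, ih]
    simp only [List.map_cons, List.map_nil, List.foldl_cons, List.foldl_nil, Int.ofNat_eq_natCast]
    rw [Prod.mk.injEq]
    refine ⟨?_, by simp only [min_def]; split_ifs <;> push_cast <;> ring_nf <;> omega⟩
    congr 2
    congr 1
    congr 1
    simp only [min_def]; split_ifs <;> ring_nf <;> omega

theorem default_month_partition_eq_alt (k : Int) (hk : k ≠ 0) :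
    default_month_partition k = default_month_partition_alt k := by
  rcases lt_trichotomy k 0 with hneg | hz | hpos
  · -- negative k: both sides are []
    unfold default_month_partition default_month_partition_alt
    have h1 : PySem.List.pyRange 0 k 1 = [] := PySem.List.pyRange_one_eq_nil (by omega)
    have h2 : PySem.List.pyRange 0 (k + 1) 1 = [] := PySem.List.pyRange_one_eq_nil (by omega)
    rcases h : PySem.Int.divmod? 12 k with _ | ⟨base, extra⟩ <;>
      simp [h1, h2, if_neg (by omega : ¬ k = 1)]
  · exact absurd hz hk
  · -- positive k
    obtain ⟨n, rfl⟩ : ∃ n : Nat, k = ((n : Nat) : Int) := ⟨k.toNat, (Int.toNat_of_nonneg (le_of_lt hpos)).symm⟩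
    by_cases h1 : (n : Int) = 1
    · have : n = 1 := by omega
      subst this; decide
    · unfold default_month_partition default_month_partition_alt
      have hdm : PySem.Int.divmod? 12 (n : Int) =
          some (PySem.Int.floordiv 12 (n : Int), PySem.Int.mod 12 (n : Int)) := by
        simp [PySem.Int.divmod?, PySem.Int.floordiv, PySem.Int.mod]
        omega
      rw [hdm]
      rw [if_neg (by simpa using h1)]
      rw [PySem.List.pyRange_one (0 : Int) (n : Int), PySem.List.pyRange_one (0 : Int) ((n : Int) + 1)]
      have hn : ((n : Int) - 0).toNat = n := by omega
      have hn1 : ((n : Int) + 1 - 0).toNat = n + 1 := by omega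
      rw [hn, hn1]
      simp only [zero_add]
      have hcast : (List.range n).map (fun k : Nat => (k : Int)) = (List.range n).map Int.ofNat := rfl
      have hcast1 : (List.range (n + 1)).map (fun k : Nat => (k : Int)) = (List.range (n + 1)).map Int.ofNat := rfl
      have hex : (0 : Int) ≤ PySem.Int.mod 12 (n : Int) :=
        PySem.Int.mod_nonneg 12 (b := (n : Int)) (by omega)
      rw [hcast, hcast1, List.map_map, zip_tail_map_range,
          foldA_eq _ _ _ hex]
      simp only [List.map_map]
      apply List.map_congr_left
      intro j hj
      simp only [Function.comp]
      norm_cast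

-- ===== VERDICT (by name: the statement is the Claim_ definition above) =====
theorem default_month_partition_spec : Claim_equal_default_month_partition := by
  intro k _ hpre
  unfold Spec_default_month_partition
  exact default_month_partition_eq_alt k hpre
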